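-- pv_equiv track=rewrite | github.com/Maiky-ahoyo/Desarrollo4 | cartelera/funciones.py | crea_diccionario_iniciales
-- ===== SOURCE A (Python) =====
-- def crea_diccionario_iniciales(lista_peliculas:list)->dict:
--     ''' Crea diccionario de iniciales a partir de
--         la lista de peliculas
--         {"inicial" =[lista_peliculas]}
--     '''
--     lista_peliculas_sorted = sorted(lista_peliculas, key=lambda x: x['titulo'],reverse=False)
--     lista_peliculas_sorted = sorted(lista_peliculas_sorted, key=lambda x: x['fecha_estreno'],reverse=True)
--     d = {}
--     for pelicula in lista_peliculas_sorted:
--         key = pelicula["titulo"]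
--         key = key[0]
--         key = key.upper()
--         if key in d:
--             d[key].append(pelicula)
--         else:
--             d[key] = [pelicula]
--     d_sorted = {k: v for k, v in sorted(d.items(), key=lambda item: item[0])}
--     return d_sorted
-- ===== SOURCE B (Python) =====
-- def crea_diccionario_iniciales(lista_peliculas: list) -> dict:
--     '''Group movies by uppercased title initial; same order as A:
--     within a group date-desc then title-asc, groups in initial order.'''
--     inicial = lambda p: p['titulo'][0].upper()
--     orden = sorted(lista_peliculas, key=lambda p: p['titulo'])
--     orden = sorted(orden, key=lambda p: p['fecha_estreno'], reverse=True)
--     iniciales = sorted({inicial(p) for p in orden})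
--     return {k: [p for p in orden if inicial(p) == k] for k in iniciales}
-- ===== Notes on version B (the rewrite author's own statement) =====
-- stated objective: idiomatic
-- what changed: B replaces A's incremental if-in-dict append loop plus final re-sort of the dict items by computing the sorted distinct initials once and building each group directly as a filter comprehension over the date/title-sorted list.
import Mathlib
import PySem

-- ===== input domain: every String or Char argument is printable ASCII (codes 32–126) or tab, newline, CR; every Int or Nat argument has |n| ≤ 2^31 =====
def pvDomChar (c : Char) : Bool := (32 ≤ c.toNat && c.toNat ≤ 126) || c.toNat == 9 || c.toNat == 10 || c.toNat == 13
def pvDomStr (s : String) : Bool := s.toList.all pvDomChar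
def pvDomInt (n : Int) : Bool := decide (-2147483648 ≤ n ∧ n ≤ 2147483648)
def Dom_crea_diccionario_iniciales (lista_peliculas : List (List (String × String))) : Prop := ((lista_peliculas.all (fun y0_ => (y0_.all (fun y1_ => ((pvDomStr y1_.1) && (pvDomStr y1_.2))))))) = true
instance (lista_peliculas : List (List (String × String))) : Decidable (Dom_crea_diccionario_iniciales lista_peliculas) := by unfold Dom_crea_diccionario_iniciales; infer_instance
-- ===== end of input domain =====

-- B groups by computing the sorted distinct initials once and taking each group as a
-- filter-comprehension over the date/title-sorted list, instead of A's incremental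
-- if-in-dict append loop followed by a re-sort of the dict items (objective: idiomatic).

-- shared helpers: dict access pelicula[k] (assoc-list, first match; total form used under Pre_)
def pvLook (p : List (String × String)) (k : String) : Option String :=
  (PySem.Dict.mk p).get? k
def pvTitulo (p : List (String × String)) : String := (pvLook p "titulo").getD ""
def pvFecha (p : List (String × String)) : String := (pvLook p "fecha_estreno").getD ""
-- key = pelicula["titulo"][0].upper()  (total form of s[0], used under Pre_: titulo nonempty)
def pvIni (p : List (String × String)) : String :=
  PySem.Str.upper (String.ofList [((PySem.Str.pyGet? (pvTitulo p) 0).getD ' ')])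

-- ===== PORT A =====
def crea_diccionario_iniciales (lista_peliculas : List (List (String × String))) : List (String × List (List (String × String))) :=
  let lista_peliculas_sorted := PySem.List.sorted lista_peliculas (fun x => pvTitulo x) false
  let lista_peliculas_sorted := PySem.List.sorted lista_peliculas_sorted (fun x => pvFecha x) true
  let d := lista_peliculas_sorted.foldl (fun d pelicula =>
      let key := pvIni pelicula
      if d.contains key then d.insert key (d.getD key [] ++ [pelicula])
      else d.insert key [pelicula]) PySem.Dict.empty
  let d_sorted := (PySem.List.sorted d.items (fun item => item.1) false).foldl
      (fun acc kv => acc.insert kv.1 kv.2) PySem.Dict.empty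
  d_sorted.items

-- ===== PORT B =====
def crea_diccionario_iniciales_alt (lista_peliculas : List (List (String × String))) : List (String × List (List (String × String))) :=
  let orden := PySem.List.sorted lista_peliculas (fun p => pvTitulo p) false
  let orden := PySem.List.sorted orden (fun p => pvFecha p) true
  let iniciales := PySem.List.sorted (PySem.Set.ofList (orden.map (fun p => pvIni p))) (fun x => x) false
  iniciales.map (fun k => (k, orden.filter (fun p => pvIni p == k)))

-- ===== PRECONDITION & SPEC =====
-- Pre_ excludes exactly the inputs where the Python A raises: a movie without a
-- "titulo" or "fecha_estreno" key (KeyError) or with an empty title (IndexError).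
def Pre_crea_diccionario_iniciales (lista_peliculas : List (List (String × String))) : Prop :=
  ∀ p ∈ lista_peliculas,
    (pvLook p "titulo").isSome = true ∧ pvTitulo p ≠ "" ∧ (pvLook p "fecha_estreno").isSome = true
instance (lista_peliculas : List (List (String × String))) : Decidable (Pre_crea_diccionario_iniciales lista_peliculas) := by unfold Pre_crea_diccionario_iniciales; infer_instance
def pvWitness_crea_diccionario_iniciales : (List (List (String × String))) :=
  [[("titulo", "alfa"), ("fecha_estreno", "2020-01-01")],
   [("titulo", "Beta"), ("fecha_estreno", "2021-05-05")]]
def Spec_crea_diccionario_iniciales (lista_peliculas : List (List (String × String))) (out : List (String × List (List (String × String)))) : Prop := out = crea_diccionario_iniciales_alt lista_peliculas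
instance (lista_peliculas : List (List (String × String))) (out : List (String × List (List (String × String)))) : Decidable (Spec_crea_diccionario_iniciales lista_peliculas out) := by unfold Spec_crea_diccionario_iniciales; infer_instance

-- ===== CLAIM (what is proved, stated in full; the proofs are below) =====
def Claim_equal_crea_diccionario_iniciales : Prop := ∀ (lista_peliculas : List (List (String × String))), Dom_crea_diccionario_iniciales lista_peliculas → Pre_crea_diccionario_iniciales lista_peliculas → Spec_crea_diccionario_iniciales lista_peliculas (crea_diccionario_iniciales lista_peliculas)

-- ===== LEMMAS AND PROOFS =====

-- A's if-in-dict append step is exactly d[k] = d.get(k, []) + [p], i.e. a modify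
theorem pvStep_eq_modify (d : PySem.Dict String (List (List (String × String)))) (p : List (String × String)) :
    (let key := pvIni p
     if d.contains key then d.insert key (d.getD key [] ++ [p]) else d.insert key [p])
    = d.modify (pvIni p) [] (fun v => v ++ [p]) := by
  by_cases h : d.contains (pvIni p) = true
  · simp [PySem.Dict.modify, h]
  · simp only [Bool.not_eq_true] at h
    simp [PySem.Dict.modify, h, PySem.Dict.getD_of_not_contains _ _ h]

-- characterisation of A's grouping dict
theorem pvDict_char (s : List (List (String × String))) :
    (s.foldl (fun d pelicula =>
        let key := pvIni pelicula
        if d.contains key then d.insert key (d.getD key [] ++ [pelicula])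
        else d.insert key [pelicula]) PySem.Dict.empty)
    = s.foldl (fun d p => d.modify (pvIni p) [] (fun v => v ++ [p])) PySem.Dict.empty := by
  congr 1
  funext d p
  exact pvStep_eq_modify d p

theorem pvGetD_group (s : List (List (String × String))) (c : String) :
    (s.foldl (fun d p => d.modify (pvIni p) [] (fun v => v ++ [p])) PySem.Dict.empty).getD c []
    = s.filter (fun p => pvIni p == c) := by
  have h := PySem.Dict.getD_foldl_modify_append
      (s.map (fun p => (pvIni p, p))) (PySem.Dict.empty) c
  rw [List.foldl_map] at h
  simpa [List.filter_map, Function.comp_def] using h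

-- ===== VERDICT (by name: the statement is the Claim_ definition above) =====
theorem crea_diccionario_iniciales_spec : Claim_equal_crea_diccionario_iniciales := by
  intro lista _hDom _hPre
  unfold Spec_crea_diccionario_iniciales
  unfold crea_diccionario_iniciales crea_diccionario_iniciales_alt
  simp only []
  set s := PySem.List.sorted (PySem.List.sorted lista (fun x => pvTitulo x) false)
      (fun x => pvFecha x) true with hs
  rw [pvDict_char]
  set d := s.foldl (fun d p => d.modify (pvIni p) [] (fun v => v ++ [p])) PySem.Dict.empty with hd
  -- keys of d
  have hkeys : d.keys = PySem.Set.ofList (s.map (fun p => pvIni p)) := by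
    rw [hd, PySem.Dict.keys_foldl_modify_key s (fun p => pvIni p) [] (fun _ p v => v ++ [p])]
    simp [PySem.Set.update_nil_left]
  have hnodup : d.keys.Nodup := by
    rw [hkeys]; exact PySem.Set.nodup_ofList _
  -- items of d
  have hitems : d.items = d.keys.map (fun k => (k, s.filter (fun p => pvIni p == k))) := by
    rw [PySem.Dict.items_eq_map_keys d hnodup []]
    exact List.map_congr_left (fun k _ => by rw [hd, pvGetD_group])
  -- the sorted items list is B's list
  set ys := (PySem.List.sorted (PySem.Set.ofList (s.map (fun p => pvIni p))) (fun x => x) false).map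
      (fun k => (k, s.filter (fun p => pvIni p == k))) with hys
  have hperm : ys.Perm d.items := by
    rw [hitems, hkeys]
    exact List.Perm.map _ (PySem.List.sorted_perm _ _ _)
  have hpair : ys.Pairwise (fun a b => a.1 < b.1) := by
    rw [hys]
    exact List.Pairwise.map _ (fun a b h => h) (PySem.List.sorted_ofList_pairwise_lt _)
  have hsorted : PySem.List.sorted d.items (fun item => item.1) false = ys :=
    PySem.List.sorted_eq_of_perm_of_pairwise_lt _ _ _ hperm hpair
  rw [hsorted]
  -- rebuilding the dict from distinct sorted keys keeps the list unchanged
  have hysnodup : (ys.map (fun kv => kv.1)).Nodup := by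
    have hn : (PySem.List.sorted (PySem.Set.ofList (s.map (fun p => pvIni p))) (fun x => x) false).Nodup :=
      (PySem.List.sorted_ofList_pairwise_lt _).imp (fun h => ne_of_lt h)
    rw [hys, List.map_map]
    simpa [Function.comp_def] using hn
  have hfresh := PySem.Dict.items_foldl_insert_fresh ys (fun kv => kv.1) (fun kv => kv.2)
      PySem.Dict.empty (fun a _ => by simp [PySem.Dict.contains_empty]) hysnodup
  rw [hfresh]
  simp [PySem.Dict.empty]
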